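-- pv_equiv track=rewrite | github.com/MushroomFleet/DJZ-Droidz-TTS | djz_hawk/src/phoneme_engine.py | phonemes_to_diphones
-- ===== SOURCE A (Python) =====
-- from typing import Dict, List, Tuple, Optional
--
-- def phonemes_to_diphones(phonemes: List[str]) -> List[str]:
--     """Convert phoneme sequence to diphone sequence"""
--     if len(phonemes) < 2:
--         return phonemes
--
--     diphones = []
--
--     # Add initial silence-phoneme diphone
--     diphones.append(f"sil_{phonemes[0]}")
--
--     # Add phoneme-phoneme diphones
--     for i in range(len(phonemes) - 1):
--         diphone = f"{phonemes[i]}_{phonemes[i + 1]}"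
--         diphones.append(diphone)
--
--     # Add final phoneme-silence diphone
--     diphones.append(f"{phonemes[-1]}_sil")
--
--     return diphones
-- ===== SOURCE B (Python) =====
-- from typing import Dict, List, Tuple, Optional
--
-- def phonemes_to_diphones(phonemes: List[str]) -> List[str]:
--     """Convert phoneme sequence to diphone sequence"""
--     if len(phonemes) < 2:
--         return phonemes
--
--     # build the result back-to-front: walk the phonemes in reverse carrying
--     # the NEXT phoneme as state (silence initially), then reverse once
--     diphones = []
--     nxt = "sil"
--     for p in reversed(phonemes):
--         diphones.append(p + "_" + nxt)
--         nxt = p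
--     diphones.append("sil_" + nxt)
--     diphones.reverse()
--     return diphones
-- ===== Notes on version B (the rewrite author's own statement) =====
-- stated objective: alternative
-- what changed: Builds the diphone list back-to-front: instead of A's forward three-phase construction (leading-silence append, index loop over range(len-1), trailing-silence append), B walks the phonemes in reverse carrying the next phoneme as state (silence initially), emits each diphone in reverse order, closes with the leading silence, and reverses once.
import Mathlib
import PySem

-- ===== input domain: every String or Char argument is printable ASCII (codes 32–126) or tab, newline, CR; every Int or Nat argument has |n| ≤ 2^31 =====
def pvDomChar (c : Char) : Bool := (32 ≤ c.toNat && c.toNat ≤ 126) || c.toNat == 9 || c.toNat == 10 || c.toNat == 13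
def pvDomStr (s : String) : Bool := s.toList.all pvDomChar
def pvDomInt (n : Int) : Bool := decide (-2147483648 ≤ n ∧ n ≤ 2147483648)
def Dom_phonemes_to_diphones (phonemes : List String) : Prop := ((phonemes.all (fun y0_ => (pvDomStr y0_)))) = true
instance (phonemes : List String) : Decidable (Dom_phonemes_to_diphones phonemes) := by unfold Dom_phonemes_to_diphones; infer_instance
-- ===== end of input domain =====

-- B replaces A's forward three-phase appends with the diphone list
-- built back-to-front: one reverse traversal carrying the next phoneme as state,
-- then a single final reverse (objective: alternative decomposition).


-- ===== PORT A =====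
def phonemes_to_diphones (phonemes : List String) : List String :=
  if phonemes.length < 2 then phonemes
  else
    let diphones : List String := []
    -- diphones.append(f"sil_{phonemes[0]}")
    let diphones := diphones ++ ["sil_" ++ PySem.List.pyGetD phonemes 0 ""]
    -- for i in range(len(phonemes) - 1): diphones.append(f"{phonemes[i]}_{phonemes[i+1]}")
    let diphones := (PySem.List.pyRange 0 ((phonemes.length : Int) - 1) 1).foldl
      (fun acc i =>
        acc ++ [PySem.List.pyGetD phonemes i "" ++ "_" ++ PySem.List.pyGetD phonemes (i + 1) ""])
      diphones
    -- diphones.append(f"{phonemes[-1]}_sil")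
    diphones ++ [PySem.List.pyGetD phonemes (-1) "" ++ "_sil"]

-- ===== PORT B =====
def phonemes_to_diphones_alt (phonemes : List String) : List String :=
  if phonemes.length < 2 then phonemes
  else
    -- for p in reversed(phonemes): diphones.append(p + "_" + nxt); nxt = p
    let st := phonemes.reverse.foldl
      (fun (st : List String × String) p => (st.1 ++ [p ++ "_" ++ st.2], p))
      ([], "sil")
    -- diphones.append("sil_" + nxt); diphones.reverse()
    (st.1 ++ ["sil_" ++ st.2]).reverse

-- ===== PRECONDITION & SPEC =====
def Spec_phonemes_to_diphones (phonemes : List String) (out : List String) : Prop := out = phonemes_to_diphones_alt phonemes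
instance (phonemes : List String) (out : List String) : Decidable (Spec_phonemes_to_diphones phonemes out) := by unfold Spec_phonemes_to_diphones; infer_instance

-- ===== CLAIM (what is proved, stated in full; the proofs are below) =====
def Claim_equal_phonemes_to_diphones : Prop := ∀ (phonemes : List String), Dom_phonemes_to_diphones phonemes → Spec_phonemes_to_diphones phonemes (phonemes_to_diphones phonemes)

-- ===== LEMMAS AND PROOFS =====

-- Python's xs[-1] on a nonempty list is its last element.
theorem pyGetD_neg_one_cons (x : String) (l : List String) :
    PySem.List.pyGetD (x :: l) (-1) "" = l.getLastD x := by
  have h : x :: l = (x :: l).dropLast ++ [l.getLastD x] := by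
    have h2 := List.dropLast_append_getLast (l := x :: l) (List.cons_ne_nil x l)
    rw [List.getLast_eq_getLastD] at h2
    simpa using h2.symm
  simp only [PySem.List.pyGetD]
  rw [h, PySem.List.pyGet?_neg_one_append_singleton]
  rfl

-- A's index loop, rewritten over List.range, is the adjacent-pairs zip map.
theorem adj_map (f : String → String → String) (xs : List String) :
    (List.range (xs.length - 1)).map
      (fun k => f (xs.getD k "") (xs.getD (k + 1) "")) =
    (xs.zip xs.tail).map (fun p => f p.1 p.2) := by
  induction xs with
  | nil => rfl
  | cons x ys ih =>
    cases ys with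
    | nil => rfl
    | cons y m =>
      simp only [List.length_cons, Nat.add_sub_cancel, List.range_succ_eq_map,
        List.map_cons, List.map_map, List.zip_cons_cons, List.tail_cons,
        Function.comp_def, Nat.succ_eq_add_one, List.getD_cons_succ, List.getD_cons_zero]
      refine congrArg₂ _ rfl ?_
      have h := ih
      simp only [List.length_cons, Nat.add_sub_cancel, List.tail_cons] at h
      exact h

-- B's reverse loop, characterised: the foldl over (x::l).reverse accumulates
-- the reversed adjacent-pair diphones (with nxt closing) and ends with state x.
theorem fold_rev (x : String) (l : List String) (acc : List String) (nxt : String) :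
    (x :: l).reverse.foldl
      (fun (st : List String × String) p => (st.1 ++ [p ++ "_" ++ st.2], p)) (acc, nxt)
    = (acc ++ (((x :: l).zip (l ++ [nxt])).map (fun p => p.1 ++ "_" ++ p.2)).reverse, x) := by
  induction l generalizing x acc nxt with
  | nil => simp
  | cons y m ih =>
    rw [show (x :: y :: m).reverse = (y :: m).reverse ++ [x] by simp]
    rw [List.foldl_append, ih y acc nxt]
    simp [List.append_assoc]

-- The zip of a nonempty list with its tail-plus-silence, split at the trailing silence.
theorem zip_sil (f : String → String → String) (l : List String) (x : String) :
    ((x :: l).zip (l ++ ["sil"])).map (fun p => f p.1 p.2) =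
      ((x :: l).zip l).map (fun p => f p.1 p.2) ++ [f (l.getLastD x) "sil"] := by
  induction l generalizing x with
  | nil => rfl
  | cons y m ih =>
    simp only [List.cons_append, List.zip_cons_cons, List.map_cons, ih y]
    simp [List.getLast?_cons]

-- ===== VERDICT (by name: the statement is the Claim_ definition above) =====
theorem phonemes_to_diphones_spec : Claim_equal_phonemes_to_diphones := by
  intro phonemes _
  unfold Spec_phonemes_to_diphones phonemes_to_diphones phonemes_to_diphones_alt
  by_cases hlen : phonemes.length < 2
  · simp [hlen]
  · simp only [hlen, if_false]
    obtain ⟨x, l, rfl⟩ : ∃ x l, phonemes = x :: l := by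
      cases phonemes with
      | nil => exact absurd (by simp) hlen
      | cons a b => exact ⟨a, b, rfl⟩
    -- A's loop: foldl over pyRange = init ++ map over List.range
    rw [PySem.List.pyRange_one, List.foldl_map, PySem.List.foldl_append_singleton_eq_map]
    have hn : (((x :: l).length : Int) - 1 - 0).toNat = (x :: l).length - 1 := by
      omega
    rw [hn]
    have hcast : ∀ k : Nat,
        (fun i => PySem.List.pyGetD (x :: l) i "" ++ "_" ++ PySem.List.pyGetD (x :: l) (i + 1) "")
          ((0 : Int) + (k : Int))
        = (fun k => (x :: l).getD k "" ++ "_" ++ (x :: l).getD (k + 1) "") k := by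
      intro k
      simp only [zero_add]
      rw [show ((k : Int) + 1) = ((k + 1 : Nat) : Int) by push_cast; ring]
      rw [PySem.List.pyGetD_natCast, PySem.List.pyGetD_natCast]
    rw [List.map_congr_left (fun k _ => hcast k), adj_map (fun a b => a ++ "_" ++ b)]
    rw [pyGetD_neg_one_cons]
    -- B's side
    rw [fold_rev x l [] "sil"]
    simp only [List.nil_append, List.tail_cons, List.reverse_append,
      List.reverse_cons, List.reverse_nil, List.reverse_reverse]
    rw [zip_sil (fun a b => a ++ "_" ++ b) l x]
    rw [show PySem.List.pyGetD (x :: l) (0 : Int) "" = x by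
      rw [show (0 : Int) = ((0 : Nat) : Int) from rfl, PySem.List.pyGetD_natCast]; rfl]
    rw [String.append_assoc]
    rfl
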